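-- pv_equiv track=rewrite | github.com/karenwsit/ToyProblems | strings_arrays/reverse_array_special.py | reverse_string_special
-- ===== SOURCE A (Python) =====
-- def reverse_string_special(string):
--     """
--     >>> reverse_string_special('a,b$c')
--     'c,b$a'
--     >>> reverse_string_special("Ab,c,de!$")
--     'ed,c,bA!$'
--     """
--     input_array = list(string)
--
--     char_array = [',', '$', '!']
--     temp_array = []
--
--     for i in range(len(input_array)):
--         if string[i] not in char_array:  # a special character
--             temp_array.append(input_array[i])
--
--     temp_array = temp_array[::-1]
--
--     for i in range(len(input_array)):
--         if input_array[i] not in char_array: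
--             new_element = temp_array.pop(0)
--             input_array[i] = new_element
--
--     return "".join(input_array)
-- ===== SOURCE B (Python) =====
-- def reverse_string_special(string):
--     special = (',', '$', '!')
--     chars = list(string)
--     i, j = 0, len(chars) - 1
--     while i < j:
--         if chars[i] in special:
--             i += 1
--         elif chars[j] in special:
--             j -= 1
--         else:
--             chars[i], chars[j] = chars[j], chars[i]
--             i += 1
--             j -= 1
--     return "".join(chars)
-- ===== Notes on version B (the rewrite author's own statement) =====
-- stated objective: faster
-- what changed: Replaced the filter/reverse/pop(0)-refill three-pass algorithm by a single in-place two-pointer swap that skips the separator characters, removing the O(n) pop(0) from the inner loop.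
import Mathlib
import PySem

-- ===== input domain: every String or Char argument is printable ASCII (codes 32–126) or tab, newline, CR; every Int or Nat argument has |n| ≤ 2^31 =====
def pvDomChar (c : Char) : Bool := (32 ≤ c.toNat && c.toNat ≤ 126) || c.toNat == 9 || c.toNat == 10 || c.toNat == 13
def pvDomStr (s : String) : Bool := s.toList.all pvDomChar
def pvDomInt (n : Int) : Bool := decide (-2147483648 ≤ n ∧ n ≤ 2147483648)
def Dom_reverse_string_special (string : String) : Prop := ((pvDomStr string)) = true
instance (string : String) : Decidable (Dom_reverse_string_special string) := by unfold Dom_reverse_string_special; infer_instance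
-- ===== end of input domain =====

-- B replaces A's three passes (filter, reverse, refill-with-pop(0)) by one in-place two-pointer
-- swap pass that skips the separator characters; measurably faster (pop(0) made A quadratic).

-- ===== PORT A =====
-- A iterates the string left to right three times; each 'for i in range(len)' reading only
-- position i is ported as the corresponding fold over the character list in the same order.
def reverse_string_special (string : String) : String :=
  let input_array : List Char := string.toList
  let char_array : List Char := [',', '$', '!']
  let temp_array : List Char :=
    input_array.foldl (fun acc c => if ¬ char_array.contains c then acc ++ [c] else acc) []
  -- temp_array = temp_array[::-1]
  let temp_array : List Char := (PySem.List.slice? temp_array none none (-1)).getD []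
  let r : List Char × List Char :=
    input_array.foldl (fun (st : List Char × List Char) c =>
      if ¬ char_array.contains c then
        match PySem.List.pop? st.2 0 with
        | some (x, rest) => (st.1 ++ [x], rest)
        | none => (st.1 ++ [c], st.2)  -- unreachable: temp_array holds one char per non-separator
      else (st.1 ++ [c], st.2)) ([], temp_array)
  String.ofList r.1

-- ===== PORT B =====
-- while i < j loop of Source B; indices are Nat (i starts at 0, j at len-1 and they only move inward,
-- exactly as in the Python, where they never go negative while the loop runs).
def bLoop (a : List Char) (i j : Nat) : List Char :=
  if h : i < j then
    match a[i]?, a[j]? with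
    | some ci, some cj =>
      if ci == ',' || ci == '$' || ci == '!' then bLoop a (i + 1) j
      else if cj == ',' || cj == '$' || cj == '!' then bLoop a i (j - 1)
      else bLoop ((a.set i cj).set j ci) (i + 1) (j - 1)
    | _, _ => a  -- unreachable: 0 ≤ i < j < a.length whenever the loop body runs
  else a
termination_by j - i
decreasing_by all_goals omega

def reverse_string_special_alt (string : String) : String :=
  let chars : List Char := string.toList
  String.ofList (bLoop chars 0 (chars.length - 1))

-- ===== PRECONDITION & SPEC =====
def Spec_reverse_string_special (string : String) (out : String) : Prop := out = reverse_string_special_alt string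
instance (string : String) (out : String) : Decidable (Spec_reverse_string_special string out) := by unfold Spec_reverse_string_special; infer_instance

-- ===== CLAIM (what is proved, stated in full; the proofs are below) =====
def Claim_equal_reverse_string_special : Prop := ∀ (string : String), Dom_reverse_string_special string → Spec_reverse_string_special string (reverse_string_special string)

-- ===== LEMMAS AND PROOFS =====

-- non-separator predicate shared by the proofs
def nsp (c : Char) : Bool := !(c == ',' || c == '$' || c == '!')

def ns (l : List Char) : List Char := l.filter nsp

-- refill l t: walk l, replacing each non-separator char by the next element of t
-- (keeping the original char if t is exhausted, as A's unreachable branch does);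
-- returns the rebuilt list and the leftover of t.
def refillP : List Char → List Char → List Char × List Char
  | [], t => ([], t)
  | c :: cs, t =>
    if nsp c then
      match t with
      | x :: ts => let p := refillP cs ts; (x :: p.1, p.2)
      | [] => let p := refillP cs []; (c :: p.1, p.2)
    else
      let p := refillP cs t; (c :: p.1, p.2)

def g (l : List Char) : List Char := (refillP l (ns l).reverse).1

lemma contains_eq (c : Char) :
    ([',', '$', '!'] : List Char).contains c = (c == ',' || c == '$' || c == '!') := by
  simp [List.contains_cons, Bool.or_assoc]
  rfl

-- ----- refill lemmas -----
lemma refillP_append (a b : List Char) : ∀ t,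
    (refillP (a ++ b) t).1 = (refillP a t).1 ++ (refillP b (t.drop (ns a).length)).1 := by
  induction a with
  | nil => intro t; simp [refillP, ns]
  | cons c cs ih =>
    intro t
    by_cases hc : nsp c = true
    · cases t with
      | nil =>
        simp [refillP, hc, ih, ns, List.filter_cons]
      | cons x ts =>
        simp [refillP, hc, ih, ns, List.filter_cons]
    · simp [refillP, hc, ih, ns, List.filter_cons]

lemma refillP_extra (m : List Char) : ∀ t u, (ns m).length ≤ t.length →
    (refillP m (t ++ u)).1 = (refillP m t).1 := by
  induction m with
  | nil => intro t u _; simp [refillP]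
  | cons c cs ih =>
    intro t u hlen
    by_cases hc : nsp c = true
    · cases t with
      | nil => simp [ns, List.filter_cons, hc] at hlen
      | cons x ts =>
        simp [ns, List.filter_cons, hc] at hlen
        simp [refillP, hc]
        exact ih ts u (by simpa [ns] using hlen)
    · simp [ns, List.filter_cons, hc] at hlen
      simp [refillP, hc]
      exact ih t u (by simpa [ns] using hlen)

-- ----- g recurrences -----
lemma g_small (mid : List Char) (h : mid.length ≤ 1) : g mid = mid := by
  match mid, h with
  | [], _ => simp [g, ns, refillP]
  | [c], _ =>
    by_cases hc : nsp c = true <;>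
      simp [g, ns, List.filter_cons, hc, refillP]

lemma g_sep_head (x : Char) (t : List Char) (hx : nsp x = false) : g (x :: t) = x :: g t := by
  simp [g, ns, List.filter_cons, hx, refillP]

lemma g_sep_last (y : Char) (t : List Char) (hy : nsp y = false) : g (t ++ [y]) = g t ++ [y] := by
  have hns : ns (t ++ [y]) = ns t := by simp [ns, List.filter_cons, hy]
  simp only [g, hns, refillP_append]
  simp [refillP, hy]

lemma refillP_cons_pos (c t : Char) (cs ts : List Char) (hc : nsp c = true) :
    refillP (c :: cs) (t :: ts) = (t :: (refillP cs ts).1, (refillP cs ts).2) := by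
  simp [refillP, hc]

lemma g_swap (x y : Char) (m : List Char) (hx : nsp x = true) (hy : nsp y = true) :
    g (x :: m ++ [y]) = y :: g m ++ [x] := by
  have hns : ns (x :: m ++ [y]) = x :: ns m ++ [y] := by
    simp [ns, List.filter_cons, hx, hy]
  simp only [g, hns]
  have hrev : (x :: ns m ++ [y]).reverse = y :: ((ns m).reverse ++ [x]) := by simp
  rw [hrev, show (x :: m ++ [y]) = x :: (m ++ [y]) from rfl,
      refillP_cons_pos x y (m ++ [y]) ((ns m).reverse ++ [x]) hx]
  have happ := refillP_append m [y] ((ns m).reverse ++ [x])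
  have hdrop : (((ns m).reverse ++ [x]).drop (ns m).length) = [x] := by
    rw [List.drop_append_of_le_length (by simp)]
    simp
  rw [hdrop] at happ
  have hextra : (refillP m ((ns m).reverse ++ [x])).1 = (refillP m (ns m).reverse).1 :=
    refillP_extra m (ns m).reverse [x] (by simp)
  have hy1 : (refillP [y] [x]).1 = [x] := by
    rw [refillP_cons_pos y x [] [] hy]; simp [refillP]
  simp only [happ, hextra, hy1]
  simp [g]

-- ----- A equals g -----
lemma contains_eq_not_nsp (c : Char) :
    ([',', '$', '!'] : List Char).contains c = !(nsp c) := by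
  rw [contains_eq]; simp [nsp]

lemma foldA_filter (l : List Char) : ∀ acc,
    l.foldl (fun acc c => if ¬ ([',', '$', '!'] : List Char).contains c then acc ++ [c] else acc) acc
      = acc ++ ns l := by
  induction l with
  | nil => intro acc; simp [ns]
  | cons c cs ih =>
    intro acc
    simp only [List.foldl_cons]
    cases hnc : nsp c
    · rw [if_neg (by rw [contains_eq_not_nsp, hnc]; simp), ih]
      simp [ns, List.filter_cons, hnc]
    · rw [if_pos (by rw [contains_eq_not_nsp, hnc]; simp), ih]
      simp [ns, List.filter_cons, hnc]

lemma foldA_refill (l : List Char) : ∀ acc t,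
    l.foldl (fun (st : List Char × List Char) c =>
      if ¬ ([',', '$', '!'] : List Char).contains c then
        match PySem.List.pop? st.2 0 with
        | some (x, rest) => (st.1 ++ [x], rest)
        | none => (st.1 ++ [c], st.2)
      else (st.1 ++ [c], st.2)) (acc, t)
      = (acc ++ (refillP l t).1, (refillP l t).2) := by
  induction l with
  | nil => intro acc t; simp [refillP]
  | cons c cs ih =>
    intro acc t
    simp only [List.foldl_cons]
    cases hnc : nsp c
    · rw [if_neg (by rw [contains_eq_not_nsp, hnc]; simp)]
      rw [ih]
      simp [refillP, hnc]
    · rw [if_pos (by rw [contains_eq_not_nsp, hnc]; simp)]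
      cases t with
      | nil =>
        simp only [show PySem.List.pop? ([] : List Char) 0 = none from rfl]
        rw [ih]
        simp [refillP, hnc]
      | cons x ts =>
        simp only [PySem.List.pop?_zero_cons]
        rw [ih]
        simp [refillP_cons_pos c x cs ts hnc]

lemma A_eq_g (s : String) : reverse_string_special s = String.ofList (g s.toList) := by
  simp only [reverse_string_special]
  rw [foldA_filter s.toList [], PySem.List.slice?_none_none_neg_one]
  simp only [List.nil_append, Option.getD_some]
  rw [foldA_refill s.toList [] (ns s.toList).reverse]
  simp [g]

-- ----- B equals g -----
lemma bLoop_invariant (n : Nat) : ∀ mid pre post : List Char, mid.length = n →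
    bLoop (pre ++ mid ++ post) pre.length (pre.length + mid.length - 1)
      = pre ++ g mid ++ post := by
  induction n using Nat.strong_induction_on with
  | _ n IH =>
  intro mid pre post hlen
  by_cases hsmall : mid.length ≤ 1
  · rw [bLoop, dif_neg (by omega), g_small mid hsmall]
  · -- mid has at least two elements: mid = x :: m ++ [y]
    obtain ⟨x, rest, hx⟩ : ∃ x rest, mid = x :: rest := by
      cases mid with
      | nil => simp at hsmall
      | cons a as => exact ⟨a, as, rfl⟩
    obtain ⟨m, y, hm⟩ : ∃ m y, rest = m ++ [y] := by
      rcases rest.eq_nil_or_concat with h | ⟨m, y, h⟩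
      · subst hx h; simp at hsmall
      · exact ⟨m, y, by simpa using h⟩
    subst hm hx
    have hcc : x :: (m ++ [y]) = (x :: m) ++ [y] := rfl
    have hj : pre.length + (x :: (m ++ [y])).length - 1 = pre.length + m.length + 1 := by
      simp; omega
    have hgi : (pre ++ (x :: (m ++ [y])) ++ post)[pre.length]? = some x := by
      rw [List.append_assoc, List.getElem?_append_right (Nat.le_refl _)]
      simp
    have hgj : (pre ++ (x :: (m ++ [y])) ++ post)[pre.length + m.length + 1]? = some y := by
      rw [List.append_assoc,
        List.getElem?_append_right (by omega : pre.length ≤ pre.length + m.length + 1)]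
      have h1 : pre.length + m.length + 1 - pre.length = m.length + 1 := by omega
      rw [h1, List.getElem?_append_left (by simp)]
      rw [List.getElem?_cons_succ, List.getElem?_append_right (Nat.le_refl _)]
      simp
    have hbx : (x == ',' || x == '$' || x == '!') = !(nsp x) := by simp [nsp]
    have hby : (y == ',' || y == '$' || y == '!') = !(nsp y) := by simp [nsp]
    rw [bLoop, hj, dif_pos (by omega : pre.length < pre.length + m.length + 1), hgi, hgj]
    simp only [hbx, hby]
    cases hnx : nsp x
    · -- head is a separator: advance i
      simp only [Bool.not_false, if_true]
      have e1 : pre ++ (x :: (m ++ [y])) ++ post = (pre ++ [x]) ++ (m ++ [y]) ++ post := by simp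
      have e2 : pre.length + 1 = (pre ++ [x]).length := by simp
      have e3 : pre.length + m.length + 1 = (pre ++ [x]).length + (m ++ [y]).length - 1 := by
        simp; omega
      rw [e1, e2, e3, IH (m.length + 1) (by simp at hlen ⊢; omega) (m ++ [y]) (pre ++ [x]) post (by simp)]
      rw [g_sep_head x (m ++ [y]) hnx]
      simp
    · simp only [Bool.not_true, if_false]
      cases hny : nsp y
      · -- last is a separator: retreat j
        simp only [Bool.not_false, if_true]
        have e1 : pre ++ (x :: (m ++ [y])) ++ post = pre ++ (x :: m) ++ ([y] ++ post) := by simp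
        have e3 : pre.length + m.length + 1 - 1 = pre.length + (x :: m).length - 1 := by simp
        rw [e1, e3, IH (m.length + 1) (by simp at hlen ⊢; omega) (x :: m) pre ([y] ++ post) (by simp)]
        rw [hcc, g_sep_last y (x :: m) hny]
        simp
      · -- both ends are non-separators: swap and move both pointers
        simp only [Bool.not_true, if_false]
        have hset : ((pre ++ (x :: (m ++ [y])) ++ post).set pre.length y).set
              (pre.length + m.length + 1) x
            = (pre ++ [y]) ++ m ++ ([x] ++ post) := by
          rw [List.append_assoc, List.set_append_right _ _ (Nat.le_refl _)]
          simp only [Nat.sub_self]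
          rw [show ((x :: (m ++ [y])) ++ post).set 0 y = (y :: (m ++ [y])) ++ post from by simp]
          rw [List.set_append_right _ _ (by omega : pre.length ≤ pre.length + m.length + 1)]
          have h1 : pre.length + m.length + 1 - pre.length = m.length + 1 := by omega
          rw [h1, List.set_append_left _ _ (by simp)]
          rw [List.set_cons_succ, List.set_append_right _ _ (Nat.le_refl _)]
          simp
        rw [hset]
        have e2 : pre.length + 1 = (pre ++ [y]).length := by simp
        have e3 : pre.length + m.length + 1 - 1 = (pre ++ [y]).length + m.length - 1 := by simp
        rw [e2, e3, IH m.length (by simp at hlen ⊢; omega) m (pre ++ [y]) ([x] ++ post) rfl]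
        rw [hcc, g_swap x y m hnx hny]
        simp

lemma B_eq_g (s : String) : reverse_string_special_alt s = String.ofList (g s.toList) := by
  simp only [reverse_string_special_alt]
  have := bLoop_invariant s.toList.length s.toList [] [] rfl
  simp only [List.nil_append, List.append_nil, List.length_nil, Nat.zero_add] at this
  rw [this]

-- ===== VERDICT (by name: the statement is the Claim_ definition above) =====
theorem reverse_string_special_spec : Claim_equal_reverse_string_special := by
  intro s _
  unfold Spec_reverse_string_special
  rw [A_eq_g, B_eq_g]
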